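-- pv_equiv track=rewrite | github.com/fidemin/algorithm-study | crackingthecodinginterview/chapter1/p1_1.py | dup_exist
-- ===== SOURCE A (Python) =====
-- def dup_exist(s):
--     if len(s) > 128:
--         return True
--
--     chars = 0
--
--     for c in s:
--         if chars & (1 << ord(c)):
--             return True
--
--         chars |= 1 << ord(c)
--
--     return False
-- ===== SOURCE B (Python) =====
-- def dup_exist(s):
--     if len(s) > 128:
--         return True
--
--     return len(set(s)) != len(s)
-- ===== Notes on version B (the rewrite author's own statement) =====
-- stated objective: simpler
-- what changed: Replaces the incremental bitmask scan with early exit by a closed comparison: build the set of characters once and compare its size with the string length.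
import Mathlib
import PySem

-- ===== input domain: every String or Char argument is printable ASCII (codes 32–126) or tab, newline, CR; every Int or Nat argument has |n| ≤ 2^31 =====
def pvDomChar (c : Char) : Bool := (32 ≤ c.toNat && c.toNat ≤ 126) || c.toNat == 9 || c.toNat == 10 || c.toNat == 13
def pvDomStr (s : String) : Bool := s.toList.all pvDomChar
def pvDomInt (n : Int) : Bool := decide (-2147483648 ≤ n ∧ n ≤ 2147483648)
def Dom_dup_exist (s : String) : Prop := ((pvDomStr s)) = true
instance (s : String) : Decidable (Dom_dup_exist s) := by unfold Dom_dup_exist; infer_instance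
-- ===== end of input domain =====

-- B replaces A's incremental bitmask scan (early exit on first repeat) by a closed
-- comparison: size of the character set versus the string length; objective: simpler.


-- ===== PORT A =====
-- the for-loop over the characters, carrying the bitmask 'chars'
def dupLoop : Nat → List Char → Bool
  | _, [] => false
  | chars, c :: rest =>
    if chars &&& (1 <<< c.toNat) ≠ 0 then true
    else dupLoop (chars ||| (1 <<< c.toNat)) rest

def dup_exist (s : String) : Bool :=
  if PySem.Str.len s > 128 then true
  else dupLoop 0 s.toList

-- ===== PORT B =====
def dup_exist_alt (s : String) : Bool :=
  if PySem.Str.len s > 128 then true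
  else decide (PySem.Set.len (PySem.Set.ofList s.toList) ≠ PySem.Str.len s)

-- ===== PRECONDITION & SPEC =====
def Spec_dup_exist (s : String) (out : Bool) : Prop := out = dup_exist_alt s
instance (s : String) (out : Bool) : Decidable (Spec_dup_exist s out) := by unfold Spec_dup_exist; infer_instance

-- ===== CLAIM (what is proved, stated in full; the proofs are below) =====
def Claim_equal_dup_exist : Prop := ∀ (s : String), Dom_dup_exist s → Spec_dup_exist s (dup_exist s)

-- ===== LEMMAS AND PROOFS =====

-- Python's truthiness test 'chars & (1 << a)' is exactly the a-th bit of chars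
theorem and_shift_ne_zero (m a : Nat) : (m &&& (1 <<< a) ≠ 0) ↔ m.testBit a := by
  rw [Nat.shiftLeft_eq, one_mul, Nat.and_two_pow]
  have h2 := Nat.two_pow_pos a
  rcases h : m.testBit a
  · simp
  · simp only [Bool.toNat_true, one_mul, iff_true]
    omega

theorem char_toNat_inj {a b : Char} (h : a.toNat = b.toNat) : a = b := by
  apply Char.ext; exact UInt32.toNat_inj.mp h

theorem testBit_self_or (m a : Nat) : (m ||| 1 <<< a).testBit a = true := by
  simp [Nat.testBit_or, Nat.shiftLeft_eq, one_mul]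

theorem testBit_other_or (m a b : Nat) (h : b ≠ a) :
    (m ||| 1 <<< a).testBit b = m.testBit b := by
  simp [Nat.testBit_or, Nat.shiftLeft_eq, one_mul, Ne.symm h]

-- the loop returns true iff some character's bit is already in the mask, or the tail repeats
theorem dupLoop_eq (l : List Char) : ∀ m : Nat,
    dupLoop m l = (l.any (fun c => m.testBit c.toNat) || !decide l.Nodup) := by
  induction l with
  | nil => simp [dupLoop]
  | cons c t ih =>
    intro m
    rw [dupLoop]
    by_cases h : m &&& (1 <<< c.toNat) ≠ 0
    · have := (and_shift_ne_zero m c.toNat).mp h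
      simp [h, this]
    · have hbit : m.testBit c.toNat = false := by
        rcases hb : m.testBit c.toNat
        · rfl
        · exact absurd ((and_shift_ne_zero m c.toNat).mpr hb) h
      rw [if_neg h, ih]
      have hany : (t.any fun x => (m ||| 1 <<< c.toNat).testBit x.toNat)
          = ((t.any fun x => m.testBit x.toNat) || decide (c ∈ t)) := by
        rcases Decidable.em (c ∈ t) with hmem | hmem
        · rw [decide_eq_true hmem, Bool.or_true, List.any_eq_true]
          exact ⟨c, hmem, testBit_self_or m c.toNat⟩
        · rw [decide_eq_false hmem, Bool.or_false, Bool.eq_iff_iff]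
          simp only [List.any_eq_true]
          constructor <;> rintro ⟨x, hx, hb⟩ <;> refine ⟨x, hx, ?_⟩ <;>
            rw [testBit_other_or m c.toNat x.toNat
              (fun he => hmem (char_toNat_inj he ▸ hx))] at * <;> exact hb
      rw [hany]
      have hnodup : decide (c :: t).Nodup = (!decide (c ∈ t) && decide t.Nodup) := by
        simp [List.nodup_cons]
      rw [List.any_cons, hbit, Bool.false_or, hnodup]
      cases (t.any fun x => m.testBit x.toNat) <;> cases hc : decide (c ∈ t) <;>
        cases hn : decide t.Nodup <;> rfl

-- size of set(l) equals len(l) iff l has no duplicates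
theorem ofList_length_eq_iff (l : List Char) :
    (PySem.Set.ofList l).length = l.length ↔ l.Nodup := by
  have hfs : (PySem.Set.ofList l : List Char).toFinset = l.toFinset := by
    apply Finset.ext; intro a; simp [List.mem_toFinset, PySem.Set.mem_ofList]
  have hcard : (PySem.Set.ofList l : List Char).toFinset.card = (PySem.Set.ofList l : List Char).length :=
    List.toFinset_card_of_nodup (PySem.Set.nodup_ofList l)
  constructor
  · intro h
    have : l.toFinset.card = l.length := by rw [← hfs, hcard, h]
    exact Multiset.toFinset_card_eq_card_iff_nodup.mp (by simpa using this)
  · intro h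
    rw [← hcard, hfs, List.toFinset_card_of_nodup h]

-- ===== VERDICT (by name: the statement is the Claim_ definition above) =====
theorem dup_exist_spec : Claim_equal_dup_exist := by
  intro s _
  unfold Spec_dup_exist dup_exist dup_exist_alt
  by_cases h : PySem.Str.len s > 128
  · rw [if_pos h, if_pos h]
  · rw [if_neg h, if_neg h, dupLoop_eq]
    have hany : (s.toList.any fun c => (0 : Nat).testBit c.toNat) = false := by
      simp [Nat.zero_testBit]
    rw [hany, Bool.false_or]
    have hiff : (PySem.Set.len (PySem.Set.ofList s.toList) ≠ PySem.Str.len s)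
        ↔ ¬ s.toList.Nodup := by
      rw [PySem.Str.len_eq]
      unfold PySem.Set.len
      rw [ne_eq, Nat.cast_inj]
      exact not_congr (ofList_length_eq_iff s.toList)
    rw [decide_eq_decide.mpr hiff, decide_not]
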